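-- pv_equiv track=rewrite | github.com/Bitterbot-AI/bp-agi | examples/arc_verify.py | grayscale_to_arc_color
-- ===== SOURCE A (Python) =====
-- GRAY_TO_COLOR = {
--     0: 0,    # Black
--     28: 1,   # Blue
--     56: 2,   # Red
--     84: 3,   # Green
--     112: 4,  # Yellow
--     140: 5,  # Gray
--     168: 6,  # Magenta
--     196: 7,  # Orange
--     224: 8,  # Azure
--     252: 9,  # Maroon
-- }
--
-- def grayscale_to_arc_color(gray):
--     """Map grayscale value back to ARC color (0-9)."""
--     # Find closest match
--     min_dist = float('inf')
--     best_color = 0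
--     for g, c in GRAY_TO_COLOR.items():
--         dist = abs(gray - g)
--         if dist < min_dist:
--             min_dist = dist
--             best_color = c
--     return best_color
-- ===== SOURCE B (Python) =====
-- def grayscale_to_arc_color(gray):
--     """Map grayscale value back to ARC color (0-9)."""
--     # closed form: nearest key among 0,28,...,252 with ties going to the lower color
--     c = -((14 - gray) // 28)
--     return max(0, min(9, c))
-- ===== Notes on version B (the rewrite author's own statement) =====
-- stated objective: simpler
-- what changed: Replaced the ten-entry nearest-key scan with a closed-form ceiling division clamped to the color range, which reproduces the loop's tie-to-lower behaviour exactly.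
import Mathlib
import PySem

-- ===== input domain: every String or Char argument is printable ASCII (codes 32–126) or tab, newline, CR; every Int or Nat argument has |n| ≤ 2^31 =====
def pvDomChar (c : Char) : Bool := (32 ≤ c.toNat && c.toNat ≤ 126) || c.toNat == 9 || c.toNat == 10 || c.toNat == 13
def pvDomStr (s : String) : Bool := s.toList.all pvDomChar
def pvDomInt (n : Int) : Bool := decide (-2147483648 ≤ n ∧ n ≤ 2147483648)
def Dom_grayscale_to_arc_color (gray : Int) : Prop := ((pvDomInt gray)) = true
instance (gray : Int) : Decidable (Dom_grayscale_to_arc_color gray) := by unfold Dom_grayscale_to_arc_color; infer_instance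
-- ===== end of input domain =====

-- B replaces A's 10-entry nearest-key scan by a closed-form ceiling division clamped to [0,9] (simpler).


-- ===== PORT A =====
-- GRAY_TO_COLOR.items() in insertion order
def grayToColorItems : List (Int × Int) :=
  [(0, 0), (28, 1), (56, 2), (84, 3), (112, 4), (140, 5), (168, 6), (196, 7), (224, 8), (252, 9)]

-- state = (min_dist, best_color); min_dist none models the initial float('inf')
def grayscale_to_arc_color (gray : Int) : Int :=
  (grayToColorItems.foldl
    (fun (st : Option Int × Int) gc =>
      let dist := |gray - gc.1|
      match st.1 with
      | none => (some dist, gc.2)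
      | some m => if dist < m then (some dist, gc.2) else st)
    (none, 0)).2

-- ===== PORT B =====
def grayscale_to_arc_color_alt (gray : Int) : Int :=
  let c := -(PySem.Int.floordiv (14 - gray) 28)
  max 0 (min 9 c)

-- ===== PRECONDITION & SPEC =====
def Spec_grayscale_to_arc_color (gray : Int) (out : Int) : Prop := out = grayscale_to_arc_color_alt gray
instance (gray : Int) (out : Int) : Decidable (Spec_grayscale_to_arc_color gray out) := by unfold Spec_grayscale_to_arc_color; infer_instance

-- ===== CLAIM (what is proved, stated in full; the proofs are below) =====
def Claim_equal_grayscale_to_arc_color : Prop := ∀ (gray : Int), Dom_grayscale_to_arc_color gray → Spec_grayscale_to_arc_color gray (grayscale_to_arc_color gray)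

-- ===== LEMMAS AND PROOFS =====

-- ===== VERDICT (by name: the statement is the Claim_ definition above) =====
theorem grayscale_to_arc_color_spec : Claim_equal_grayscale_to_arc_color := by
  intro gray _
  unfold Spec_grayscale_to_arc_color grayscale_to_arc_color grayscale_to_arc_color_alt grayToColorItems
  rw [PySem.Int.floordiv_eq_ediv_of_pos (by norm_num)]
  rcases (by omega : gray ≤ 14 ∨ 14 < gray) with h | h
  · -- interval 0
    have f1 : ¬ (((gray - 28).natAbs : Int) < ((gray - 0).natAbs : Int)) := by omega
    have f2 : ¬ (((gray - 56).natAbs : Int) < ((gray - 0).natAbs : Int)) := by omega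
    have f3 : ¬ (((gray - 84).natAbs : Int) < ((gray - 0).natAbs : Int)) := by omega
    have f4 : ¬ (((gray - 112).natAbs : Int) < ((gray - 0).natAbs : Int)) := by omega
    have f5 : ¬ (((gray - 140).natAbs : Int) < ((gray - 0).natAbs : Int)) := by omega
    have f6 : ¬ (((gray - 168).natAbs : Int) < ((gray - 0).natAbs : Int)) := by omega
    have f7 : ¬ (((gray - 196).natAbs : Int) < ((gray - 0).natAbs : Int)) := by omega
    have f8 : ¬ (((gray - 224).natAbs : Int) < ((gray - 0).natAbs : Int)) := by omega
    have f9 : ¬ (((gray - 252).natAbs : Int) < ((gray - 0).natAbs : Int)) := by omega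
    simp only [List.foldl, Int.abs_eq_natAbs, f1, f2, f3, f4, f5, f6, f7, f8, f9, if_false]
    omega
  rcases (by omega : gray ≤ 42 ∨ 42 < gray) with h | h
  · -- interval 1
    have t1 : ((gray - 28).natAbs : Int) < ((gray - 0).natAbs : Int) := by omega
    have f2 : ¬ (((gray - 56).natAbs : Int) < ((gray - 28).natAbs : Int)) := by omega
    have f3 : ¬ (((gray - 84).natAbs : Int) < ((gray - 28).natAbs : Int)) := by omega
    have f4 : ¬ (((gray - 112).natAbs : Int) < ((gray - 28).natAbs : Int)) := by omega
    have f5 : ¬ (((gray - 140).natAbs : Int) < ((gray - 28).natAbs : Int)) := by omega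
    have f6 : ¬ (((gray - 168).natAbs : Int) < ((gray - 28).natAbs : Int)) := by omega
    have f7 : ¬ (((gray - 196).natAbs : Int) < ((gray - 28).natAbs : Int)) := by omega
    have f8 : ¬ (((gray - 224).natAbs : Int) < ((gray - 28).natAbs : Int)) := by omega
    have f9 : ¬ (((gray - 252).natAbs : Int) < ((gray - 28).natAbs : Int)) := by omega
    simp only [List.foldl, Int.abs_eq_natAbs, t1, f2, f3, f4, f5, f6, f7, f8, f9, if_true, if_false]
    omega
  rcases (by omega : gray ≤ 70 ∨ 70 < gray) with h | h
  · -- interval 2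
    have t1 : ((gray - 28).natAbs : Int) < ((gray - 0).natAbs : Int) := by omega
    have t2 : ((gray - 56).natAbs : Int) < ((gray - 28).natAbs : Int) := by omega
    have f3 : ¬ (((gray - 84).natAbs : Int) < ((gray - 56).natAbs : Int)) := by omega
    have f4 : ¬ (((gray - 112).natAbs : Int) < ((gray - 56).natAbs : Int)) := by omega
    have f5 : ¬ (((gray - 140).natAbs : Int) < ((gray - 56).natAbs : Int)) := by omega
    have f6 : ¬ (((gray - 168).natAbs : Int) < ((gray - 56).natAbs : Int)) := by omega
    have f7 : ¬ (((gray - 196).natAbs : Int) < ((gray - 56).natAbs : Int)) := by omega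
    have f8 : ¬ (((gray - 224).natAbs : Int) < ((gray - 56).natAbs : Int)) := by omega
    have f9 : ¬ (((gray - 252).natAbs : Int) < ((gray - 56).natAbs : Int)) := by omega
    simp only [List.foldl, Int.abs_eq_natAbs, t1, t2, f3, f4, f5, f6, f7, f8, f9, if_true, if_false]
    omega
  rcases (by omega : gray ≤ 98 ∨ 98 < gray) with h | h
  · -- interval 3
    have t1 : ((gray - 28).natAbs : Int) < ((gray - 0).natAbs : Int) := by omega
    have t2 : ((gray - 56).natAbs : Int) < ((gray - 28).natAbs : Int) := by omega
    have t3 : ((gray - 84).natAbs : Int) < ((gray - 56).natAbs : Int) := by omega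
    have f4 : ¬ (((gray - 112).natAbs : Int) < ((gray - 84).natAbs : Int)) := by omega
    have f5 : ¬ (((gray - 140).natAbs : Int) < ((gray - 84).natAbs : Int)) := by omega
    have f6 : ¬ (((gray - 168).natAbs : Int) < ((gray - 84).natAbs : Int)) := by omega
    have f7 : ¬ (((gray - 196).natAbs : Int) < ((gray - 84).natAbs : Int)) := by omega
    have f8 : ¬ (((gray - 224).natAbs : Int) < ((gray - 84).natAbs : Int)) := by omega
    have f9 : ¬ (((gray - 252).natAbs : Int) < ((gray - 84).natAbs : Int)) := by omega
    simp only [List.foldl, Int.abs_eq_natAbs, t1, t2, t3, f4, f5, f6, f7, f8, f9, if_true, if_false]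
    omega
  rcases (by omega : gray ≤ 126 ∨ 126 < gray) with h | h
  · -- interval 4
    have t1 : ((gray - 28).natAbs : Int) < ((gray - 0).natAbs : Int) := by omega
    have t2 : ((gray - 56).natAbs : Int) < ((gray - 28).natAbs : Int) := by omega
    have t3 : ((gray - 84).natAbs : Int) < ((gray - 56).natAbs : Int) := by omega
    have t4 : ((gray - 112).natAbs : Int) < ((gray - 84).natAbs : Int) := by omega
    have f5 : ¬ (((gray - 140).natAbs : Int) < ((gray - 112).natAbs : Int)) := by omega
    have f6 : ¬ (((gray - 168).natAbs : Int) < ((gray - 112).natAbs : Int)) := by omega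
    have f7 : ¬ (((gray - 196).natAbs : Int) < ((gray - 112).natAbs : Int)) := by omega
    have f8 : ¬ (((gray - 224).natAbs : Int) < ((gray - 112).natAbs : Int)) := by omega
    have f9 : ¬ (((gray - 252).natAbs : Int) < ((gray - 112).natAbs : Int)) := by omega
    simp only [List.foldl, Int.abs_eq_natAbs, t1, t2, t3, t4, f5, f6, f7, f8, f9, if_true, if_false]
    omega
  rcases (by omega : gray ≤ 154 ∨ 154 < gray) with h | h
  · -- interval 5
    have t1 : ((gray - 28).natAbs : Int) < ((gray - 0).natAbs : Int) := by omega
    have t2 : ((gray - 56).natAbs : Int) < ((gray - 28).natAbs : Int) := by omega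
    have t3 : ((gray - 84).natAbs : Int) < ((gray - 56).natAbs : Int) := by omega
    have t4 : ((gray - 112).natAbs : Int) < ((gray - 84).natAbs : Int) := by omega
    have t5 : ((gray - 140).natAbs : Int) < ((gray - 112).natAbs : Int) := by omega
    have f6 : ¬ (((gray - 168).natAbs : Int) < ((gray - 140).natAbs : Int)) := by omega
    have f7 : ¬ (((gray - 196).natAbs : Int) < ((gray - 140).natAbs : Int)) := by omega
    have f8 : ¬ (((gray - 224).natAbs : Int) < ((gray - 140).natAbs : Int)) := by omega
    have f9 : ¬ (((gray - 252).natAbs : Int) < ((gray - 140).natAbs : Int)) := by omega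
    simp only [List.foldl, Int.abs_eq_natAbs, t1, t2, t3, t4, t5, f6, f7, f8, f9, if_true, if_false]
    omega
  rcases (by omega : gray ≤ 182 ∨ 182 < gray) with h | h
  · -- interval 6
    have t1 : ((gray - 28).natAbs : Int) < ((gray - 0).natAbs : Int) := by omega
    have t2 : ((gray - 56).natAbs : Int) < ((gray - 28).natAbs : Int) := by omega
    have t3 : ((gray - 84).natAbs : Int) < ((gray - 56).natAbs : Int) := by omega
    have t4 : ((gray - 112).natAbs : Int) < ((gray - 84).natAbs : Int) := by omega
    have t5 : ((gray - 140).natAbs : Int) < ((gray - 112).natAbs : Int) := by omega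
    have t6 : ((gray - 168).natAbs : Int) < ((gray - 140).natAbs : Int) := by omega
    have f7 : ¬ (((gray - 196).natAbs : Int) < ((gray - 168).natAbs : Int)) := by omega
    have f8 : ¬ (((gray - 224).natAbs : Int) < ((gray - 168).natAbs : Int)) := by omega
    have f9 : ¬ (((gray - 252).natAbs : Int) < ((gray - 168).natAbs : Int)) := by omega
    simp only [List.foldl, Int.abs_eq_natAbs, t1, t2, t3, t4, t5, t6, f7, f8, f9, if_true, if_false]
    omega
  rcases (by omega : gray ≤ 210 ∨ 210 < gray) with h | h
  · -- interval 7
    have t1 : ((gray - 28).natAbs : Int) < ((gray - 0).natAbs : Int) := by omega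
    have t2 : ((gray - 56).natAbs : Int) < ((gray - 28).natAbs : Int) := by omega
    have t3 : ((gray - 84).natAbs : Int) < ((gray - 56).natAbs : Int) := by omega
    have t4 : ((gray - 112).natAbs : Int) < ((gray - 84).natAbs : Int) := by omega
    have t5 : ((gray - 140).natAbs : Int) < ((gray - 112).natAbs : Int) := by omega
    have t6 : ((gray - 168).natAbs : Int) < ((gray - 140).natAbs : Int) := by omega
    have t7 : ((gray - 196).natAbs : Int) < ((gray - 168).natAbs : Int) := by omega
    have f8 : ¬ (((gray - 224).natAbs : Int) < ((gray - 196).natAbs : Int)) := by omega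
    have f9 : ¬ (((gray - 252).natAbs : Int) < ((gray - 196).natAbs : Int)) := by omega
    simp only [List.foldl, Int.abs_eq_natAbs, t1, t2, t3, t4, t5, t6, t7, f8, f9, if_true, if_false]
    omega
  rcases (by omega : gray ≤ 238 ∨ 238 < gray) with h | h
  · -- interval 8
    have t1 : ((gray - 28).natAbs : Int) < ((gray - 0).natAbs : Int) := by omega
    have t2 : ((gray - 56).natAbs : Int) < ((gray - 28).natAbs : Int) := by omega
    have t3 : ((gray - 84).natAbs : Int) < ((gray - 56).natAbs : Int) := by omega
    have t4 : ((gray - 112).natAbs : Int) < ((gray - 84).natAbs : Int) := by omega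
    have t5 : ((gray - 140).natAbs : Int) < ((gray - 112).natAbs : Int) := by omega
    have t6 : ((gray - 168).natAbs : Int) < ((gray - 140).natAbs : Int) := by omega
    have t7 : ((gray - 196).natAbs : Int) < ((gray - 168).natAbs : Int) := by omega
    have t8 : ((gray - 224).natAbs : Int) < ((gray - 196).natAbs : Int) := by omega
    have f9 : ¬ (((gray - 252).natAbs : Int) < ((gray - 224).natAbs : Int)) := by omega
    simp only [List.foldl, Int.abs_eq_natAbs, t1, t2, t3, t4, t5, t6, t7, t8, f9, if_true, if_false]
    omega
  -- interval 9
  have t1 : ((gray - 28).natAbs : Int) < ((gray - 0).natAbs : Int) := by omega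
  have t2 : ((gray - 56).natAbs : Int) < ((gray - 28).natAbs : Int) := by omega
  have t3 : ((gray - 84).natAbs : Int) < ((gray - 56).natAbs : Int) := by omega
  have t4 : ((gray - 112).natAbs : Int) < ((gray - 84).natAbs : Int) := by omega
  have t5 : ((gray - 140).natAbs : Int) < ((gray - 112).natAbs : Int) := by omega
  have t6 : ((gray - 168).natAbs : Int) < ((gray - 140).natAbs : Int) := by omega
  have t7 : ((gray - 196).natAbs : Int) < ((gray - 168).natAbs : Int) := by omega
  have t8 : ((gray - 224).natAbs : Int) < ((gray - 196).natAbs : Int) := by omega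
  have t9 : ((gray - 252).natAbs : Int) < ((gray - 224).natAbs : Int) := by omega
  simp only [List.foldl, Int.abs_eq_natAbs, t1, t2, t3, t4, t5, t6, t7, t8, t9, if_true]
  omega
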